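-- pv_equiv track=rewrite | github.com/bvoightlab/Baymer | baymer/baymer_mcmc_functions.py | get_leaf_contexts
-- ===== SOURCE A (Python) =====
-- from itertools import product
--
-- def get_leaf_contexts(context, max_mer, oppo_asymmetry):
--     leaf_contexts = []
--     context_length = len(context)
--
--     odd_max_bool = max_mer % 2
--
--     nucleotides_to_add = int(max_mer - context_length)
--     odd_bool = 0
--     if odd_max_bool and nucleotides_to_add % 2 and not oppo_asymmetry:
--         odd_bool = 1
--     elif not odd_max_bool and nucleotides_to_add % 2 and oppo_asymmetry:
--         odd_bool = 1
--     left_flank_length = int(nucleotides_to_add / 2) + odd_bool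
--
--     for combination in product('ACGT', repeat=nucleotides_to_add):
--         bases = ''.join(combination)
--         if left_flank_length == 0:
--             leaf_context = context + bases
--         else:
--             leaf_context = bases[0:left_flank_length] + context + bases[left_flank_length:]
--         leaf_contexts.append(leaf_context)
--
--     return leaf_contexts
-- ===== SOURCE B (Python) =====
-- def get_leaf_contexts(context, max_mer, oppo_asymmetry):
--     n = int(max_mer - len(context))
--     odd_bool = 1 if n % 2 and bool(max_mer % 2) != bool(oppo_asymmetry) else 0
--     left_flank_length = n // 2 + odd_bool
--     right_flank_length = n - left_flank_length
--
--     def num_to_bases(k, length):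
--         s = ''
--         for _ in range(length):
--             s = 'ACGT'[k % 4] + s
--             k //= 4
--         return s
--
--     leaf_contexts = []
--     base = 4 ** right_flank_length
--     for i in range(4 ** n):
--         q, r = divmod(i, base)
--         leaf_contexts.append(num_to_bases(q, left_flank_length) + context
--                              + num_to_bases(r, right_flank_length))
--     return leaf_contexts
-- ===== Notes on version B (the rewrite author's own statement) =====
-- stated objective: alternative
-- what changed: Replaces itertools.product plus per-item string slicing by index arithmetic: enumerate i in range(4**n), split i with divmod by 4**right_flank_length, and decode each half into bases by repeated base-4 digit extraction; excludes max_mer < len(context), where A's product(repeat=negative) raises ValueError.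
import Mathlib
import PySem

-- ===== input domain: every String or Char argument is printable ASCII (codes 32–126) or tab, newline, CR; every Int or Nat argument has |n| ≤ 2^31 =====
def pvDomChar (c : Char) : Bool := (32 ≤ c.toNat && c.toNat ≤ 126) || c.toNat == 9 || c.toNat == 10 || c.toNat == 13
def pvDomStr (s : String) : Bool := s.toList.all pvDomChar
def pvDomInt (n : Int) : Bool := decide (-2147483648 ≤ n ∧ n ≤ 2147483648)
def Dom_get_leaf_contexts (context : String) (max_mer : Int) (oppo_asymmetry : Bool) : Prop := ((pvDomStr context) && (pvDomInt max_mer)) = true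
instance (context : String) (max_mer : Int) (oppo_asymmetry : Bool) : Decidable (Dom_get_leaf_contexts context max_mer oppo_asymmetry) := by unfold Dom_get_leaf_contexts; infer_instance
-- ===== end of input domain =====

-- B replaces the itertools.product enumeration plus per-item slicing by index arithmetic:
-- each output index i is split by divmod and decoded into base-4 flank strings; alternative decomposition.

-- ===== PORT A =====
-- itertools.product('ACGT', repeat=n): earlier positions vary slowest, last fastest (exact).
def pvProdACGT : Nat → List (List Char)
  | 0 => [[]]
  | n + 1 => (pvProdACGT n).flatMap (fun xs => ['A', 'C', 'G', 'T'].map (fun c => xs ++ [c]))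

def get_leaf_contexts (context : String) (max_mer : Int) (oppo_asymmetry : Bool) : List String :=
  let cl := context.toList
  let odd_max_bool := PySem.Int.mod max_mer 2
  let nucleotides_to_add : Int := max_mer - (cl.length : Int)
  let odd_bool : Nat :=
    if odd_max_bool ≠ 0 ∧ PySem.Int.mod nucleotides_to_add 2 ≠ 0 ∧ oppo_asymmetry = false then 1
    else if odd_max_bool = 0 ∧ PySem.Int.mod nucleotides_to_add 2 ≠ 0 ∧ oppo_asymmetry = true then 1
    else 0
  -- int(nucleotides_to_add / 2) = nucleotides_to_add // 2 on Pre_ (nucleotides_to_add ≥ 0): exact there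
  let left_flank_length : Nat := (PySem.Int.floordiv nucleotides_to_add 2).toNat + odd_bool
  (pvProdACGT nucleotides_to_add.toNat).map (fun combination =>
    if left_flank_length = 0 then String.ofList (cl ++ combination)
    else String.ofList (combination.take left_flank_length ++ cl ++ combination.drop left_flank_length))

-- ===== PORT B =====
-- 'ACGT'[r] for r = k % 4 < 4: exact table lookup
def pvDigit (r : Nat) : Char :=
  if r = 0 then 'A' else if r = 1 then 'C' else if r = 2 then 'G' else 'T'

-- num_to_bases: prepend 'ACGT'[k % 4], k //= 4, `length` times
def pvNumToBases : Nat → Nat → List Char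
  | _, 0 => []
  | k, len + 1 => pvNumToBases (k / 4) len ++ [pvDigit (k % 4)]

def get_leaf_contexts_alt (context : String) (max_mer : Int) (oppo_asymmetry : Bool) : List String :=
  let cl := context.toList
  let n : Int := max_mer - (cl.length : Int)
  let odd_bool : Nat :=
    if PySem.Int.mod n 2 ≠ 0 ∧ (decide (PySem.Int.mod max_mer 2 ≠ 0)) ≠ oppo_asymmetry then 1 else 0
  let left_flank_length : Nat := (PySem.Int.floordiv n 2).toNat + odd_bool
  let right_flank_length : Nat := n.toNat - left_flank_length
  let base : Nat := 4 ^ right_flank_length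
  (List.range (4 ^ n.toNat)).map (fun i =>
    String.ofList (pvNumToBases (i / base) left_flank_length ++ cl
      ++ pvNumToBases (i % base) right_flank_length))

-- ===== PRECONDITION & SPEC =====
-- Pre_ excludes max_mer < len(context): there nucleotides_to_add < 0 and A raises ValueError
-- from product('ACGT', repeat=negative).
def Pre_get_leaf_contexts (context : String) (max_mer : Int) (oppo_asymmetry : Bool) : Prop :=
  (PySem.Str.len context : Int) ≤ max_mer
instance (context : String) (max_mer : Int) (oppo_asymmetry : Bool) : Decidable (Pre_get_leaf_contexts context max_mer oppo_asymmetry) := by unfold Pre_get_leaf_contexts; infer_instance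
def pvWitness_get_leaf_contexts : String × Int × Bool := ("AC", 4, false)

def Spec_get_leaf_contexts (context : String) (max_mer : Int) (oppo_asymmetry : Bool) (out : List String) : Prop := out = get_leaf_contexts_alt context max_mer oppo_asymmetry
instance (context : String) (max_mer : Int) (oppo_asymmetry : Bool) (out : List String) : Decidable (Spec_get_leaf_contexts context max_mer oppo_asymmetry out) := by unfold Spec_get_leaf_contexts; infer_instance

-- ===== CLAIM (what is proved, stated in full; the proofs are below) =====
def Claim_equal_get_leaf_contexts : Prop := ∀ (context : String) (max_mer : Int) (oppo_asymmetry : Bool), Dom_get_leaf_contexts context max_mer oppo_asymmetry → Pre_get_leaf_contexts context max_mer oppo_asymmetry → Spec_get_leaf_contexts context max_mer oppo_asymmetry (get_leaf_contexts context max_mer oppo_asymmetry)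

-- ===== LEMMAS AND PROOFS =====

theorem pvNumToBases_length (k len : Nat) : (pvNumToBases k len).length = len := by
  induction len generalizing k with
  | zero => simp [pvNumToBases]
  | succ n ih => simp [pvNumToBases, ih]

theorem pvNumToBases_split (b a k : Nat) :
    pvNumToBases k (a + b) =
      pvNumToBases (k / 4 ^ b) a ++ pvNumToBases (k % 4 ^ b) b := by
  induction b generalizing k with
  | zero => simp [pvNumToBases]
  | succ b ih =>
    show pvNumToBases k ((a + b) + 1) = _
    rw [pvNumToBases, ih]
    have h1 : k / 4 / 4 ^ b = k / 4 ^ (b + 1) := by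
      rw [Nat.div_div_eq_div_mul, pow_succ']
    have h2 : k % 4 ^ (b + 1) % 4 = k % 4 := by
      apply Nat.mod_mod_of_dvd
      exact ⟨4 ^ b, (pow_succ' 4 b)⟩
    have h3 : k % 4 ^ (b + 1) / 4 = k / 4 % 4 ^ b := by
      rw [pow_succ']
      exact Nat.mod_mul_right_div_self k 4 (4 ^ b)
    rw [pvNumToBases, h1, h2, h3, List.append_assoc]

theorem range_mul_flatMap (a b : Nat) (f : Nat → List Char) :
    (List.range (a * b)).map f =
      (List.range a).flatMap (fun q => (List.range b).map (fun r => f (b * q + r))) := by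
  induction a with
  | zero => simp
  | succ a ih =>
    have : (a + 1) * b = a * b + b := by ring
    rw [this, List.range_add, List.map_append, List.map_map, List.range_succ,
      List.flatMap_append, ih]
    simp only [List.flatMap_cons, List.flatMap_nil, List.append_nil]
    congr 1
    refine List.map_congr_left fun r _ => ?_
    simp only [Function.comp]
    congr 1
    ring

theorem pvProdACGT_eq (n : Nat) :
    pvProdACGT n = (List.range (4 ^ n)).map (fun i => pvNumToBases i n) := by
  induction n with
  | zero => simp [pvProdACGT, pvNumToBases]
  | succ n ih =>
    rw [pvProdACGT, ih, pow_succ]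
    rw [range_mul_flatMap]
    rw [List.flatMap_map]
    refine List.flatMap_congr fun q _ => ?_
    have hr4 : List.range 4 = [0, 1, 2, 3] := by decide
    rw [hr4]
    simp only [List.map_cons, List.map_nil]
    have key : ∀ r, r < 4 → pvNumToBases (4 * q + r) (n + 1) = pvNumToBases q n ++ [pvDigit r] := by
      intro r hr
      rw [pvNumToBases]
      have hd : (4 * q + r) / 4 = q := by omega
      have hm : (4 * q + r) % 4 = r := by omega
      rw [hd, hm]
    rw [key 0 (by norm_num), key 1 (by norm_num), key 2 (by norm_num), key 3 (by norm_num)]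
    simp [pvDigit]

theorem odd_bool_eq (m nta : Int) (o : Bool) :
    (if PySem.Int.mod m 2 ≠ 0 ∧ PySem.Int.mod nta 2 ≠ 0 ∧ o = false then (1 : Nat)
     else if PySem.Int.mod m 2 = 0 ∧ PySem.Int.mod nta 2 ≠ 0 ∧ o = true then 1
     else 0)
    = (if PySem.Int.mod nta 2 ≠ 0 ∧ (decide (PySem.Int.mod m 2 ≠ 0)) ≠ o then 1 else 0) := by
  by_cases h1 : PySem.Int.mod m 2 = 0 <;> by_cases h2 : PySem.Int.mod nta 2 = 0 <;>
    cases o <;> simp <;> split_ifs <;> tauto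

-- ===== VERDICT (by name: the statement is the Claim_ definition above) =====
theorem get_leaf_contexts_spec : Claim_equal_get_leaf_contexts := by
  intro context max_mer oppo_asymmetry _ hpre
  unfold Spec_get_leaf_contexts get_leaf_contexts get_leaf_contexts_alt
  dsimp only
  have hpre' : (context.toList.length : Int) ≤ max_mer := by
    simpa [PySem.Str.len] using hpre
  set cl := context.toList with hcl
  set nta : Int := max_mer - (cl.length : Int) with hnta
  have hnn : 0 ≤ nta := by omega
  rw [odd_bool_eq]
  set ob : Nat :=
    (if PySem.Int.mod nta 2 ≠ 0 ∧ (decide (PySem.Int.mod max_mer 2 ≠ 0)) ≠ oppo_asymmetry then 1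
     else 0) with hob
  set L : Nat := (PySem.Int.floordiv nta 2).toNat + ob with hL
  set R : Nat := nta.toNat - L with hR
  have hLn : L ≤ nta.toNat := by
    have hfd : PySem.Int.floordiv nta 2 = nta / 2 :=
      PySem.Int.floordiv_eq_ediv_of_pos (by omega)
    rcases Nat.eq_zero_or_pos ob with h | h
    · rw [hL, h, hfd]; omega
    · have hmm : PySem.Int.mod nta 2 = nta % 2 := PySem.Int.mod_eq_emod_of_pos (by omega)
      have hob1 : nta % 2 ≠ 0 := by
        by_contra hmod
        rw [hob, hmm] at h
        simp [hmod] at h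
      have hob2 : ob ≤ 1 := by rw [hob]; split_ifs <;> omega
      rw [hL, hfd]
      omega
  have hsplit : L + R = nta.toNat := by omega
  rw [pvProdACGT_eq, List.map_map]
  refine List.map_congr_left fun i hi => ?_
  have hi4 : i < 4 ^ nta.toNat := List.mem_range.mp hi
  simp only [Function.comp]
  have hdecomp : pvNumToBases i nta.toNat =
      pvNumToBases (i / 4 ^ R) L ++ pvNumToBases (i % 4 ^ R) R := by
    rw [← hsplit, pvNumToBases_split]
  by_cases h0 : L = 0
  · have hRn : R = nta.toNat := by omega
    have him : i % 4 ^ R = i := Nat.mod_eq_of_lt (by rw [hRn]; exact hi4)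
    simp only [h0, if_true]
    rw [him]
    simp [pvNumToBases, hRn]
  · simp only [h0, if_false]
    rw [hdecomp]
    have hlen : (pvNumToBases (i / 4 ^ R) L).length = L := pvNumToBases_length _ _
    rw [List.take_left' hlen, List.drop_left' hlen]
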